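-- pv_equiv track=rewrite | github.com/cd-public/Isadora | CTs/2pass.py | get_shadows
-- ===== SOURCE A (Python) =====
-- def get_shadows(name, key):
-- 	last = ""
-- 	to_ret = []
-- 	for reg in key:
-- 		splits = reg[2].split()
-- 		if splits[0] != last:
-- 			last = splits[0]
-- 			if "shadow_" in last:
-- 				to_ret += [last]
-- 	return to_ret
-- ===== SOURCE B (Python) =====
-- def get_shadows(name, key):
--     def runs(tokens):
--         # recursively decompose into consecutive equal runs, keeping each run's head
--         if not tokens:
--             return []
--         head = tokens[0]
--         i = 1
--         while i < len(tokens) and tokens[i] == head: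
--             i += 1
--         return [head] + runs(tokens[i:])
--     heads = runs([reg[2].split()[0] for reg in key])
--     return [t for t in heads if "shadow_" in t]
-- ===== Notes on version B (the rewrite author's own statement) =====
-- stated objective: alternative
-- what changed: Replaces A's one-pass stateful sentinel loop by a staged pipeline: materialize the first-token list, recursively decompose it into consecutive equal runs (keeping each run head, skipping the run with an inner scan), then a separate filter pass keeps the heads containing 'shadow_'.
import Mathlib
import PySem

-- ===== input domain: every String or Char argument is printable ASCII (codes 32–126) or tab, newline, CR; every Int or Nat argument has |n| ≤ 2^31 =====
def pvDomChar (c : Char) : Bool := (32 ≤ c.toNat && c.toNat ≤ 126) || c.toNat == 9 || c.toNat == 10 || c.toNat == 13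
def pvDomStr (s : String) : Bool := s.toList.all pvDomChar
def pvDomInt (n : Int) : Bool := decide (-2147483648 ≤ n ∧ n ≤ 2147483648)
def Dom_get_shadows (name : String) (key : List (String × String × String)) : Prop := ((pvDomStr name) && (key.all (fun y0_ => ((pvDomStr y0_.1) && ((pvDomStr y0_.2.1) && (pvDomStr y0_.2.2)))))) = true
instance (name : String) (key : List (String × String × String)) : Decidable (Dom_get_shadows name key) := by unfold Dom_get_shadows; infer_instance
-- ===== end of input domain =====

-- B replaces A's stateful sentinel loop by a staged pipeline (token list, recursive
-- run decomposition, then a filter pass); an alternative decomposition, same cost.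

-- ===== PORT A =====
def get_shadows (name : String) (key : List (String × String × String)) : List String :=
  (key.foldl (fun st reg =>
      let splits := PySem.Str.split₀ reg.2.2
      -- splits[0]: pyGet? = none is Python's IndexError, excluded by Pre_get_shadows
      let s0 := (PySem.List.pyGet? splits 0).getD ""
      if s0 ≠ st.1 then
        (s0, if PySem.Str.isIn "shadow_" s0 then st.2 ++ [s0] else st.2)
      else st) ("", ([] : List String))).2

-- ===== PORT B =====
/-- `"shadow_" in t`. -/
def pvShadow (t : String) : Bool := PySem.Str.isIn "shadow_" t

/-- first token of reg[2] (pyGet? = none is Python's IndexError, outside Pre_). -/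
def pvTok (reg : String × String × String) : String :=
  (PySem.List.pyGet? (PySem.Str.split₀ reg.2.2) 0).getD ""

/-- B's inner `while` that skips the rest of the current run. -/
def pvSkip (t : String) : List String → List String
  | [] => []
  | u :: us => if u == t then pvSkip t us else u :: us

theorem pvSkip_length_le (t : String) (ts : List String) :
    (pvSkip t ts).length ≤ ts.length := by
  induction ts with
  | nil => simp [pvSkip]
  | cons u us ih =>
      simp only [pvSkip]
      split
      · exact Nat.le_succ_of_le ih
      · simp

/-- B's recursive `runs`: heads of the consecutive equal runs. -/
def pvRuns : List String → List String
  | [] => []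
  | t :: ts => t :: pvRuns (pvSkip t ts)
termination_by l => l.length
decreasing_by simpa using Nat.lt_succ_of_le (pvSkip_length_le t ts)

def get_shadows_alt (name : String) (key : List (String × String × String)) : List String :=
  (pvRuns (key.map pvTok)).filter pvShadow

-- ===== PRECONDITION & SPEC =====
-- Pre_ excludes exactly the inputs where some reg[2] is empty/whitespace-only, on which
-- Python A (and B alike) raises IndexError at split()[0].
def Pre_get_shadows (name : String) (key : List (String × String × String)) : Prop :=
  ∀ reg ∈ key, PySem.Str.split₀ reg.2.2 ≠ []
instance (name : String) (key : List (String × String × String)) : Decidable (Pre_get_shadows name key) := by unfold Pre_get_shadows; infer_instance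

def pvWitness_get_shadows : String × (List (String × String × String)) :=
  ("n", [("a", "b", "shadow_x y"), ("c", "d", "foo")])

def Spec_get_shadows (name : String) (key : List (String × String × String)) (out : List String) : Prop := out = get_shadows_alt name key
instance (name : String) (key : List (String × String × String)) (out : List String) : Decidable (Spec_get_shadows name key out) := by unfold Spec_get_shadows; infer_instance

-- ===== CLAIM (what is proved, stated in full; the proofs are below) =====
def Claim_equal_get_shadows : Prop := ∀ (name : String) (key : List (String × String × String)), Dom_get_shadows name key → Pre_get_shadows name key → Spec_get_shadows name key (get_shadows name key)

-- ===== LEMMAS AND PROOFS =====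

/-- A's loop body on the token it extracts. -/
def pvStep (st : String × List String) (t : String) : String × List String :=
  if t ≠ st.1 then (t, if pvShadow t then st.2 ++ [t] else st.2) else st

/-- consecutive-dedup-then-filter, an intermediate characterisation of both ports. -/
def pvF : Option String → List String → List String
  | _, [] => []
  | prev, t :: ts =>
      if prev ≠ some t ∧ pvShadow t then t :: pvF (some t) ts
      else pvF (some t) ts

theorem pvA_eq (ts : List String) (last : String) (acc : List String) :
    (ts.foldl pvStep (last, acc)).2 = acc ++ pvF (some last) ts := by
  induction ts generalizing last acc with
  | nil => simp [pvF]
  | cons t ts ih =>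
      rw [List.foldl_cons]
      by_cases h : t = last
      · subst h
        rw [show pvStep (t, acc) t = (t, acc) by simp [pvStep], ih]
        simp only [pvF]
        rw [if_neg (by simp)]
      · by_cases hs : pvShadow t = true
        · rw [show pvStep (last, acc) t = (t, acc ++ [t]) by simp [pvStep, h, hs], ih]
          simp only [pvF]
          rw [if_pos ⟨by simpa using fun e => h e.symm, hs⟩, List.append_assoc]
          rfl
        · rw [show pvStep (last, acc) t = (t, acc) by simp [pvStep, h, hs], ih]
          simp only [pvF]
          rw [if_neg (fun hc => hs hc.2)]

theorem pvF_skip (ts : List String) (t : String) :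
    pvF (some t) ts = pvF none (pvSkip t ts) := by
  induction ts with
  | nil => rfl
  | cons u us ih =>
      simp only [pvSkip]
      by_cases h : u = t
      · subst h
        simp only [pvF, beq_self_eq_true, if_true]
        rw [if_neg (by simp), ← ih]
      · rw [if_neg (by simpa using h)]
        simp only [pvF]
        by_cases hs : pvShadow u = true
        · rw [if_pos ⟨by simpa using fun e => h e.symm, hs⟩, if_pos ⟨by simp, hs⟩]
        · rw [if_neg (fun hc => hs hc.2), if_neg (fun hc => hs hc.2)]

theorem pvRuns_filter (ts : List String) :
    (pvRuns ts).filter pvShadow = pvF none ts := by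
  induction ts using pvRuns.induct with
  | case1 => simp [pvRuns, pvF]
  | case2 t ts ih =>
      simp only [pvRuns, List.filter_cons]
      rw [ih, ← pvF_skip]
      simp only [pvF]
      by_cases hs : pvShadow t = true
      · rw [if_pos hs, if_pos ⟨by simp, hs⟩]
      · rw [if_neg (by simpa using hs), if_neg (fun hc => hs hc.2)]

theorem pvF_none (ts : List String) : pvF none ts = pvF (some "") ts := by
  cases ts with
  | nil => rfl
  | cons t ts =>
      by_cases h : t = ""
      · subst h
        have hs : pvShadow "" = false := by decide
        simp [pvF, hs]
      · simp only [pvF]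
        by_cases hs : pvShadow t = true
        · rw [if_pos ⟨by simp, hs⟩, if_pos ⟨by simpa using Ne.symm h, hs⟩]
        · rw [if_neg (fun hc => hs hc.2), if_neg (fun hc => hs hc.2)]

-- ===== VERDICT (by name: the statement is the Claim_ definition above) =====
theorem get_shadows_spec : Claim_equal_get_shadows := by
  intro name key _ _
  show get_shadows name key = get_shadows_alt name key
  have hA : get_shadows name key = ((key.map pvTok).foldl pvStep ("", [])).2 := by
    rw [List.foldl_map]
    rfl
  rw [hA, get_shadows_alt, pvRuns_filter, pvF_none]
  simpa using pvA_eq (key.map pvTok) "" []
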